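-- pv_equiv track=rewrite | github.com/noboevbo/PedRec | pedrec/tools/datasets/sim_dataset_generator.py | get_uid_frame_gt
-- ===== SOURCE A (Python) =====
-- from typing import List, Dict
--
-- def get_uid_frame_gt(frame_uid_gts: Dict[int, any]):
--     uid_frame_gt = {}
--     for frame_nr, uid_gt in frame_uid_gts.items():
--         for uid, gt in uid_gt.items():
--             if uid not in uid_frame_gt:
--                 uid_frame_gt[uid] = {}
--             gt["frame_nr_local"] = len(uid_frame_gt[uid])
--             uid_frame_gt[uid][frame_nr] = gt
--     return uid_frame_gt
-- ===== SOURCE B (Python) =====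
-- def get_uid_frame_gt(frame_uid_gts):
--     # gather-per-uid: list uids in first appearance order, then for each uid
--     # scan the frames once, collecting and annotating its gts
--     order = []
--     for uid_gt in frame_uid_gts.values():
--         for uid in uid_gt:
--             if uid not in order:
--                 order.append(uid)
--     result = {}
--     for uid in order:
--         pairs = [(f, ug[uid]) for f, ug in frame_uid_gts.items() if uid in ug]
--         for i, (_, gt) in enumerate(pairs):
--             gt["frame_nr_local"] = i
--         result[uid] = dict(pairs)
--     return result
-- ===== Notes on version B (the rewrite author's own statement) =====
-- stated objective: alternative
-- what changed: A builds the nested result incrementally in one interleaved pass over frames, maintaining a dict-of-dicts accumulator with a len-based counter; B never maintains that accumulator: it first computes the uid order (first appearance), then for each uid gathers that uid's (frame, gt) pairs by a fresh scan of the frames and annotates them by enumerate, assembling each output entry independently.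
import Mathlib
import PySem

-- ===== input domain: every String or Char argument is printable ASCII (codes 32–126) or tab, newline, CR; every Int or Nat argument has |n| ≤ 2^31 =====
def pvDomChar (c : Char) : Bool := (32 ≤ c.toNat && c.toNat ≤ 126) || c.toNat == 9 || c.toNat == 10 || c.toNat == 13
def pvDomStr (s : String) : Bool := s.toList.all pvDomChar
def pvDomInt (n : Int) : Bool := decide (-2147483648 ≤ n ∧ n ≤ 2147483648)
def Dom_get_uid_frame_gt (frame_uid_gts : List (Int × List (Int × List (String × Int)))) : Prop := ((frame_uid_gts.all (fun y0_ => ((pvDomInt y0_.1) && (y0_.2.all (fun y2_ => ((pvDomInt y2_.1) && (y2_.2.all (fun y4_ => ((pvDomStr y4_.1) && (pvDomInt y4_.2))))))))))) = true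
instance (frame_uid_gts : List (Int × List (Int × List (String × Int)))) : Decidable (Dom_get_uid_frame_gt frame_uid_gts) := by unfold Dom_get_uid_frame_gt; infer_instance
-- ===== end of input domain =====

-- B replaces A's single incremental pass (a dict-of-dicts accumulator with a len-based counter) by a
-- gather-per-uid algorithm: compute the uid order first, then build each uid's entry independently by
-- a fresh scan of the frames, annotating by enumerate (objective: alternative).
-- Both A and B set gt["frame_nr_local"] on the gt dicts of the input in place (the same mutation);
-- the equivalence proved here is about the RETURN value.

-- ===== PORT A =====
-- one iteration of A's inner loop, for the current frame number f
def pvStepA (f : Int) (acc : PySem.Dict Int (PySem.Dict Int (PySem.Dict String Int)))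
    (ug : Int × List (String × Int)) : PySem.Dict Int (PySem.Dict Int (PySem.Dict String Int)) :=
  let acc1 := if acc.contains ug.1 then acc else acc.insert ug.1 PySem.Dict.empty
  let cur := acc1.getD ug.1 PySem.Dict.empty
  acc1.insert ug.1 (cur.insert f ((PySem.Dict.mk ug.2).insert "frame_nr_local" (Int.ofNat cur.size)))

def get_uid_frame_gt (frame_uid_gts : List (Int × List (Int × List (String × Int)))) : List (Int × List (Int × List (String × Int))) :=
  ((frame_uid_gts.foldl (fun acc fg => fg.2.foldl (pvStepA fg.1) acc) PySem.Dict.empty).items.map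
    (fun p => (p.1, p.2.items.map (fun q => (q.1, q.2.items)))))

-- ===== PORT B =====
-- pairs = [(f, ug[uid]) for f, ug in frame_uid_gts.items() if uid in ug]   (dict lookup = first match)
def pvGather (frame_uid_gts : List (Int × List (Int × List (String × Int)))) (uid : Int) :
    List (Int × List (String × Int)) :=
  frame_uid_gts.filterMap (fun fg => ((PySem.Dict.mk fg.2).get? uid).map (fun g => (fg.1, g)))

-- for i, (_, gt) in enumerate(pairs): gt["frame_nr_local"] = i
def pvAnnPairs (pairs : List (Int × List (String × Int))) : List (Int × PySem.Dict String Int) :=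
  (PySem.List.enumerate pairs 0).map
    (fun ip => (ip.2.1, (PySem.Dict.mk ip.2.2).insert "frame_nr_local" ip.1))

def get_uid_frame_gt_alt (frame_uid_gts : List (Int × List (Int × List (String × Int)))) : List (Int × List (Int × List (String × Int))) :=
  -- uid order of first appearance: for uid in uid_gt: if uid not in order: order.append(uid)
  let order : PySem.Set Int :=
    frame_uid_gts.foldl (fun s fg => fg.2.foldl (fun s ug => PySem.Set.add s ug.1) s) PySem.Set.empty
  -- result[uid] = dict(pairs), pairs annotated
  let result : PySem.Dict Int (PySem.Dict Int (PySem.Dict String Int)) :=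
    order.foldl (fun res u => res.insert u (PySem.Dict.ofList (pvAnnPairs (pvGather frame_uid_gts u))))
      PySem.Dict.empty
  result.items.map (fun p => (p.1, p.2.items.map (fun q => (q.1, q.2.items))))

-- ===== PRECONDITION & SPEC =====
-- Pre_ excludes association lists with duplicate frame keys or duplicate uid keys inside a frame:
-- those do not encode any Python dict (dict construction collapses duplicates), so the corner is
-- an artefact of the list representation and its behaviour is anybody's choice.
def Pre_get_uid_frame_gt (frame_uid_gts : List (Int × List (Int × List (String × Int)))) : Prop :=
  (frame_uid_gts.map (fun fg => fg.1)).Nodup ∧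
  ∀ fg ∈ frame_uid_gts, (fg.2.map (fun ug => ug.1)).Nodup
instance (frame_uid_gts : List (Int × List (Int × List (String × Int)))) : Decidable (Pre_get_uid_frame_gt frame_uid_gts) := by unfold Pre_get_uid_frame_gt; infer_instance

def pvWitness_get_uid_frame_gt : (List (Int × List (Int × List (String × Int)))) :=
  [(0, [(1, [("x", 5)]), (2, [])]), (7, [(1, [("x", 3)])])]

def Spec_get_uid_frame_gt (frame_uid_gts : List (Int × List (Int × List (String × Int)))) (out : List (Int × List (Int × List (String × Int)))) : Prop := out = get_uid_frame_gt_alt frame_uid_gts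
instance (frame_uid_gts : List (Int × List (Int × List (String × Int)))) (out : List (Int × List (Int × List (String × Int)))) : Decidable (Spec_get_uid_frame_gt frame_uid_gts out) := by unfold Spec_get_uid_frame_gt; infer_instance

-- ===== CLAIM (what is proved, stated in full; the proofs are below) =====
def Claim_equal_get_uid_frame_gt : Prop := ∀ (frame_uid_gts : List (Int × List (Int × List (String × Int)))), Dom_get_uid_frame_gt frame_uid_gts → Pre_get_uid_frame_gt frame_uid_gts → Spec_get_uid_frame_gt frame_uid_gts (get_uid_frame_gt frame_uid_gts)

-- ===== LEMMAS AND PROOFS =====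

-- the input flattened to (frame, (uid, gt)) triples, in A's processing order
def pvFlat (L : List (Int × List (Int × List (String × Int)))) :
    List (Int × (Int × List (String × Int))) :=
  L.flatMap (fun fg => fg.2.map (fun ug => (fg.1, ug)))

-- A's per-uid inner-dict build, over that uid's (frame, gt) pairs
def pvBuild (d : PySem.Dict Int (PySem.Dict String Int)) (pairs : List (Int × List (String × Int))) :
    PySem.Dict Int (PySem.Dict String Int) :=
  pairs.foldl (fun d p => d.insert p.1 ((PySem.Dict.mk p.2).insert "frame_nr_local" (Int.ofNat d.size))) d

theorem pvStepA_insert (f : Int) (acc : PySem.Dict Int (PySem.Dict Int (PySem.Dict String Int)))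
    (ug : Int × List (String × Int)) :
    pvStepA f acc ug = acc.insert ug.1 ((acc.getD ug.1 PySem.Dict.empty).insert f
      ((PySem.Dict.mk ug.2).insert "frame_nr_local"
        (Int.ofNat (acc.getD ug.1 PySem.Dict.empty).size))) := by
  unfold pvStepA
  by_cases h : acc.contains ug.1
  · simp [h]
  · simp only [h, Bool.false_eq_true, if_false]
    rw [PySem.Dict.getD_insert_self, PySem.Dict.insert_insert_self,
      PySem.Dict.getD_of_not_contains _ _ (by simpa using h)]

theorem pvFoldA_flat (L : List (Int × List (Int × List (String × Int))))
    (init : PySem.Dict Int (PySem.Dict Int (PySem.Dict String Int))) :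
    L.foldl (fun acc fg => fg.2.foldl (pvStepA fg.1) acc) init =
      (pvFlat L).foldl (fun acc x => pvStepA x.1 acc x.2) init := by
  rw [pvFlat, List.foldl_flatMap]
  apply PySem.List.foldl_congr_mem
  intro acc fg _
  rw [List.foldl_map]

theorem pvOrder_eq (L : List (Int × List (Int × List (String × Int)))) :
    (L.foldl (fun s fg => fg.2.foldl (fun s ug => PySem.Set.add s ug.1) s) PySem.Set.empty : PySem.Set Int) =
      PySem.Set.ofList ((pvFlat L).map (fun x => x.2.1)) := by
  rw [← PySem.Set.update_nil_left, PySem.Set.update_map_eq_foldl_add, pvFlat, List.foldl_flatMap]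
  apply PySem.List.foldl_congr_mem
  intro acc fg _
  rw [List.foldl_map]

theorem pvGetD_foldFlat (l : List (Int × (Int × List (String × Int))))
    (acc : PySem.Dict Int (PySem.Dict Int (PySem.Dict String Int))) (u : Int) :
    ((l.foldl (fun acc x => pvStepA x.1 acc x.2) acc).getD u PySem.Dict.empty) =
      pvBuild (acc.getD u PySem.Dict.empty)
        ((l.filter (fun x => x.2.1 == u)).map (fun x => (x.1, x.2.2))) := by
  induction l generalizing acc with
  | nil => rfl
  | cons x rest ih =>
    rw [List.foldl_cons, ih, pvStepA_insert, List.filter_cons]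
    by_cases h : x.2.1 = u
    · simp only [h, beq_self_eq_true, if_true, List.map_cons]
      rw [PySem.Dict.getD_insert_self]
      rfl
    · have hb : (x.2.1 == u) = false := beq_eq_false_iff_ne.mpr h
      rw [hb, if_neg (by simp), PySem.Dict.getD_insert_of_ne _ _ _ (Ne.symm h)]

theorem pvBuild_items (pairs : List (Int × List (String × Int)))
    (d : PySem.Dict Int (PySem.Dict String Int))
    (hnd : (pairs.map (fun p => p.1)).Nodup)
    (hf : ∀ p ∈ pairs, d.contains p.1 = false) :
    (pvBuild d pairs).items = d.items ++
      (PySem.List.enumerate pairs (Int.ofNat d.size)).map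
        (fun ip => (ip.2.1, (PySem.Dict.mk ip.2.2).insert "frame_nr_local" ip.1)) := by
  induction pairs generalizing d with
  | nil => simp [pvBuild, PySem.List.enumerate_nil]
  | cons p rest ih =>
    have hp : d.contains p.1 = false := hf p (by simp)
    have hitems := PySem.Dict.items_insert_of_not_contains d
      ((PySem.Dict.mk p.2).insert "frame_nr_local" (Int.ofNat d.size)) hp
    rw [pvBuild, List.foldl_cons, ← pvBuild, ih, hitems, PySem.List.enumerate_cons]
    · have hsz : (d.insert p.1 ((PySem.Dict.mk p.2).insert "frame_nr_local" (Int.ofNat d.size))).size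
          = d.size + 1 := by
        rw [PySem.Dict.size_insert, if_neg (by simp [hp])]
      rw [hsz]
      simp [List.append_assoc]
    · rw [List.map_cons] at hnd
      exact (List.nodup_cons.mp hnd).2
    · intro q hq
      rw [List.map_cons] at hnd
      rw [PySem.Dict.contains_insert]
      have hne : q.1 ≠ p.1 := by
        intro he
        exact (List.nodup_cons.mp hnd).1 (he ▸ List.mem_map_of_mem (f := fun p => p.1) hq)
      simp [hne, hf q (List.mem_cons_of_mem _ hq)]

theorem pvFilter_frame (l : List (Int × List (String × Int))) (u : Int)
    (hnd : (l.map (fun ug => ug.1)).Nodup) :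
    l.filter (fun ug => ug.1 == u) =
      ((PySem.Dict.mk l).get? u).elim [] (fun g => [(u, g)]) := by
  induction l with
  | nil => rfl
  | cons p rest ih =>
    rw [List.map_cons] at hnd
    obtain ⟨h1, h2⟩ := List.nodup_cons.mp hnd
    rw [List.filter_cons]
    by_cases h : p.1 = u
    · have : (PySem.Dict.mk (p :: rest)).get? u = some p.2 := by
        rw [show (p :: rest) = (p.1, p.2) :: rest by simp, PySem.Dict.get?_mk_cons]
        simp [h]
      have hrest : rest.filter (fun ug => ug.1 == u) = [] := by
        apply List.filter_eq_nil_iff.mpr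
        intro q hq hbe
        exact h1 (by rw [h, ← eq_of_beq hbe]; exact List.mem_map_of_mem (f := fun ug => ug.1) hq)
      rw [this, hrest]
      simp only [if_pos (show ((p.1 : Int) == u) = true by simp [h]), Option.elim]
      rw [← h]
    · have : (PySem.Dict.mk (p :: rest)).get? u = (PySem.Dict.mk rest).get? u := by
        rw [show (p :: rest) = (p.1, p.2) :: rest by simp, PySem.Dict.get?_mk_cons]
        simp [h]
      rw [this, if_neg (by simp [h]), ih h2]

theorem pvGather_eq (L : List (Int × List (Int × List (String × Int)))) (u : Int)
    (hin : ∀ fg ∈ L, (fg.2.map (fun ug => ug.1)).Nodup) :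
    ((pvFlat L).filter (fun x => x.2.1 == u)).map (fun x => (x.1, x.2.2)) = pvGather L u := by
  induction L with
  | nil => rfl
  | cons fg rest ih =>
    have hfr := pvFilter_frame fg.2 u (hin fg (by simp))
    conv_rhs => rw [pvGather, List.filterMap_cons]
    rw [pvFlat, List.flatMap_cons, ← pvFlat, List.filter_append, List.map_append,
      ih (fun g hg => hin g (List.mem_cons_of_mem _ hg)), List.filter_map,
      show ((fun x : Int × (Int × List (String × Int)) => x.2.1 == u) ∘ fun ug => (fg.1, ug)) =
        (fun ug => ug.1 == u) from rfl, hfr]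
    cases hx : (PySem.Dict.mk fg.2).get? u <;> simp [hx, pvGather]

theorem pvGather_fst_sublist (L : List (Int × List (Int × List (String × Int)))) (u : Int) :
    ((pvGather L u).map (fun p => p.1)).Sublist (L.map (fun fg => fg.1)) := by
  induction L with
  | nil => simp [pvGather]
  | cons fg rest ih =>
    rw [pvGather, List.filterMap_cons, ← pvGather]
    cases hx : (PySem.Dict.mk fg.2).get? u with
    | none => simpa using List.Sublist.cons fg.1 ih
    | some g => simpa using List.Sublist.cons₂ fg.1 ih

theorem pvItems_ofList {ν : Type} (l : List (Int × ν)) (hnd : (l.map (fun p => p.1)).Nodup) :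
    (PySem.Dict.ofList l).items = l := by
  show (List.foldl (fun acc p => acc.insert p.1 p.2) PySem.Dict.empty l).items = l
  rw [PySem.Dict.items_foldl_insert_fresh l (fun p => p.1) (fun p => p.2) PySem.Dict.empty
    (fun p _ => PySem.Dict.contains_empty _) hnd]
  simp [show (PySem.Dict.empty : PySem.Dict Int ν).items = [] from rfl]

theorem pvAnnPairs_fst (g : List (Int × List (String × Int))) :
    (pvAnnPairs g).map (fun p => p.1) = g.map (fun p => p.1) := by
  rw [pvAnnPairs, List.map_map,
    show ((fun p : Int × PySem.Dict String Int => p.1) ∘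
      (fun ip : Int × (Int × List (String × Int)) =>
        (ip.2.1, (PySem.Dict.mk ip.2.2).insert "frame_nr_local" ip.1))) =
      ((fun p : Int × List (String × Int) => p.1) ∘ (fun ip : Int × (Int × List (String × Int)) => ip.2)) from rfl,
    ← List.map_map, PySem.List.map_snd_enumerate]

-- ===== VERDICT (by name: the statement is the Claim_ definition above) =====
theorem get_uid_frame_gt_spec : Claim_equal_get_uid_frame_gt := by
  intro L _ hpre
  show get_uid_frame_gt L = get_uid_frame_gt_alt L
  obtain ⟨h1, h2⟩ := hpre
  have hfun : (fun (acc : PySem.Dict Int (PySem.Dict Int (PySem.Dict String Int)))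
      (x : Int × (Int × List (String × Int))) => pvStepA x.1 acc x.2) =
      (fun acc x => acc.insert x.2.1 ((acc.getD x.2.1 PySem.Dict.empty).insert x.1
        ((PySem.Dict.mk x.2.2).insert "frame_nr_local"
          (Int.ofNat (acc.getD x.2.1 PySem.Dict.empty).size)))) := by
    funext acc x; exact pvStepA_insert x.1 acc x.2
  -- the A-side dict
  set D := (pvFlat L).foldl (fun acc x => pvStepA x.1 acc x.2) PySem.Dict.empty with hD
  have hkeys : D.keys = PySem.Set.ofList ((pvFlat L).map (fun x => x.2.1)) := by
    rw [hD, hfun, PySem.Dict.keys_foldl_insert_key, PySem.Dict.keys_empty, PySem.Set.update_nil_left]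
  have hnodup : D.keys.Nodup := hkeys ▸ PySem.Set.nodup_ofList _
  -- per-uid gather facts
  have hgfst : ∀ u, ((pvGather L u).map (fun p => p.1)).Nodup :=
    fun u => (pvGather_fst_sublist L u).nodup h1
  have hgetD : ∀ u, D.getD u PySem.Dict.empty = pvBuild PySem.Dict.empty (pvGather L u) := by
    intro u
    rw [hD, pvGetD_foldFlat, pvGather_eq L u h2]
    rfl
  have hDitems : ∀ u, (D.getD u PySem.Dict.empty).items = pvAnnPairs (pvGather L u) := by
    intro u
    rw [hgetD u, pvBuild_items (pvGather L u) PySem.Dict.empty (hgfst u)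
      (fun p _ => PySem.Dict.contains_empty _)]
    rfl
  -- A's output
  have hA : get_uid_frame_gt L = (PySem.Set.ofList ((pvFlat L).map (fun x => x.2.1))).map
      (fun u => (u, (pvAnnPairs (pvGather L u)).map (fun q => (q.1, q.2.items)))) := by
    rw [get_uid_frame_gt, pvFoldA_flat, ← hD,
      PySem.Dict.items_eq_map_keys D hnodup PySem.Dict.empty, hkeys, List.map_map]
    apply List.map_congr_left
    intro u _
    simp only [Function.comp_apply]
    rw [hDitems u]
  -- B's output
  have hB : get_uid_frame_gt_alt L = (PySem.Set.ofList ((pvFlat L).map (fun x => x.2.1))).map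
      (fun u => (u, (pvAnnPairs (pvGather L u)).map (fun q => (q.1, q.2.items)))) := by
    rw [get_uid_frame_gt_alt]
    simp only [pvOrder_eq L]
    rw [PySem.Dict.items_foldl_insert_fresh _ (fun u => u) _ PySem.Dict.empty
      (fun a _ => PySem.Dict.contains_empty _) (by simpa using PySem.Set.nodup_ofList _)]
    rw [show (PySem.Dict.empty : PySem.Dict Int (PySem.Dict Int (PySem.Dict String Int))).items = [] from rfl,
      List.nil_append, List.map_map]
    apply List.map_congr_left
    intro u _
    simp only [Function.comp_apply]
    rw [pvItems_ofList _ (by rw [pvAnnPairs_fst]; exact hgfst u)]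
  rw [hA, hB]
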